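-- pv_equiv track=rewrite | github.com/alexandraback/datacollection | solutions_5634697451274240_1/Python/Yaksha/Pancakes.py | numFlipsIt
-- ===== SOURCE A (Python) =====
-- def numFlipsIt(stack):
--     numChanges = 0
--
--     for i in range(len(stack)-1):
--         if stack[i] != stack[i+1]:
--             numChanges += 1
--
--     if stack[-1] == '-':
--         numChanges += 1
--
--     return numChanges
-- ===== SOURCE B (Python) =====
-- def numFlipsIt(stack):
--     last = stack[-1]
--     # count the maximal runs of consecutive equal elements by skipping each run
--     n = len(stack)
--     runs = 0
--     i = 0
--     while i < n:
--         head = stack[i]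
--         i += 1
--         while i < n and stack[i] == head:
--             i += 1
--         runs += 1
--     numChanges = runs - 1
--     if last == '-':
--         numChanges += 1
--     return numChanges
-- ===== Notes on version B (the rewrite author's own statement) =====
-- stated objective: alternative
-- what changed: B counts the maximal runs of consecutive equal elements by recursively skipping each run and returns runs-1 (plus the last-element '-' flag), instead of A's index loop over adjacent pairs; Pre_ excludes the empty list, on which both raise IndexError at stack[-1].
import Mathlib
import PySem

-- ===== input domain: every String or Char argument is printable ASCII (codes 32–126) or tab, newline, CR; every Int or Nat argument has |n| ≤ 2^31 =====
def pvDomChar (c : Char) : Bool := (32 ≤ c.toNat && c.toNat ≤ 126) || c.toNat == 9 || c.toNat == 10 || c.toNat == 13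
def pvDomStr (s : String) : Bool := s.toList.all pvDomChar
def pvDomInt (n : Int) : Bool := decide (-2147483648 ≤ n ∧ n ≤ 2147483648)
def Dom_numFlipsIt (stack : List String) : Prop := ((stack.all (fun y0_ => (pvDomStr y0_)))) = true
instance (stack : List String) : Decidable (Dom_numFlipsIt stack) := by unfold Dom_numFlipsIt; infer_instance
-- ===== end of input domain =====

-- B counts the maximal runs of consecutive equal elements (adjacent differences = runs - 1)
-- instead of A's index loop over adjacent pairs; alternative decomposition, same cost.

-- ===== PORT A =====
def numFlipsIt (stack : List String) : Int :=
  let numChanges : Int :=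
    (PySem.List.pyRange 0 (PySem.List.len stack - 1) 1).foldl
      (fun acc i =>
        if PySem.List.pyGetD stack i "" ≠ PySem.List.pyGetD stack (i + 1) "" then acc + 1
        else acc) 0
  let numChanges := if PySem.List.pyGetD stack (-1) "" = "-" then numChanges + 1 else numChanges
  numChanges

-- ===== PORT B =====
-- inner while loop of Source B: advance past the leading elements equal to `head`
def pvSkipRun (head : String) : List String → List String
  | [] => []
  | x :: t => if x = head then pvSkipRun head t else x :: t

theorem pvSkipRun_length_le (head : String) (t : List String) :
    (pvSkipRun head t).length ≤ t.length := by
  induction t with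
  | nil => simp [pvSkipRun]
  | cons x t ih =>
    simp only [pvSkipRun]
    split
    · exact le_trans ih (Nat.le_succ _)
    · exact le_refl _

-- outer while loop of Source B: the index walk over `stack` rendered as recursion on the suffix
def pvNumRuns : List String → Int
  | [] => 0
  | head :: t => 1 + pvNumRuns (pvSkipRun head t)
termination_by xs => xs.length
decreasing_by
  simpa using Nat.lt_succ_of_le (pvSkipRun_length_le head t)

def numFlipsIt_alt (stack : List String) : Int :=
  let last := PySem.List.pyGetD stack (-1) ""
  let runs := pvNumRuns stack
  let numChanges := runs - 1
  let numChanges := if last = "-" then numChanges + 1 else numChanges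
  numChanges

-- ===== PRECONDITION & SPEC =====
-- Pre_ excludes exactly the empty list, on which both A and B raise IndexError at stack[-1].
def Pre_numFlipsIt (stack : List String) : Prop := stack ≠ []
instance (stack : List String) : Decidable (Pre_numFlipsIt stack) := by
  unfold Pre_numFlipsIt; infer_instance

def pvWitness_numFlipsIt : List String := ["-", "+", "+"]

def Spec_numFlipsIt (stack : List String) (out : Int) : Prop := out = numFlipsIt_alt stack
instance (stack : List String) (out : Int) : Decidable (Spec_numFlipsIt stack out) := by
  unfold Spec_numFlipsIt; infer_instance

-- ===== CLAIM (what is proved, stated in full; the proofs are below) =====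
def Claim_equal_numFlipsIt : Prop :=
  ∀ (stack : List String), Dom_numFlipsIt stack → Pre_numFlipsIt stack →
    Spec_numFlipsIt stack (numFlipsIt stack)

-- ===== LEMMAS AND PROOFS =====

theorem pvNumRuns_nil : pvNumRuns [] = 0 := by rw [pvNumRuns]

theorem pvNumRuns_cons (h : String) (t : List String) :
    pvNumRuns (h :: t) = 1 + pvNumRuns (pvSkipRun h t) := by
  rw [pvNumRuns]

-- adjacent-difference count: the common characterisation of both loops
def pvCountAdj : List String → Int
  | a :: b :: t => (if a ≠ b then 1 else 0) + pvCountAdj (b :: t)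
  | _ => 0

theorem pvNumRuns_skip (t : List String) (h : String) :
    pvCountAdj (h :: t) = pvNumRuns (pvSkipRun h t) := by
  induction t generalizing h with
  | nil => simp [pvCountAdj, pvSkipRun, pvNumRuns_nil]
  | cons x t ih =>
    by_cases hx : x = h
    · subst hx
      simp only [pvSkipRun, if_pos]
      simpa [pvCountAdj] using ih x
    · have hs : pvSkipRun h (x :: t) = x :: t := by
        simp [pvSkipRun, hx]
      rw [hs, pvNumRuns_cons, ← ih x]
      simp [pvCountAdj]
      intro hxh; exact absurd hxh.symm hx

theorem pvNumRuns_eq (h : String) (t : List String) :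
    pvNumRuns (h :: t) = pvCountAdj (h :: t) + 1 := by
  rw [pvNumRuns_cons, pvNumRuns_skip t h]; omega

theorem pvFoldA (xs : List String) (c : Int) :
    (List.range (xs.length - 1)).foldl
      (fun acc k => if xs.getD k "" ≠ xs.getD (k + 1) "" then acc + 1 else acc) c
    = c + pvCountAdj xs := by
  induction xs generalizing c with
  | nil => simp [pvCountAdj]
  | cons a t ih =>
    cases t with
    | nil => simp [pvCountAdj]
    | cons b t' =>
      have hlen : (a :: b :: t').length - 1 = (b :: t').length - 1 + 1 := by simp
      rw [hlen, List.range_succ_eq_map, List.foldl_cons, List.foldl_map]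
      have hfun :
          (fun (acc : Int) (k : Nat) =>
            if (a :: b :: t').getD k.succ "" ≠ (a :: b :: t').getD (k.succ + 1) "" then acc + 1
            else acc)
          = (fun (acc : Int) (k : Nat) =>
            if (b :: t').getD k "" ≠ (b :: t').getD (k + 1) "" then acc + 1 else acc) := by
        funext acc k
        simp
      rw [hfun, ih]
      simp only [pvCountAdj, List.getD_cons_zero, List.getD_cons_succ]
      split_ifs <;> omega

theorem pvFoldA' (xs : List String) :
    (PySem.List.pyRange 0 (PySem.List.len xs - 1) 1).foldl
      (fun acc i =>
        if PySem.List.pyGetD xs i "" ≠ PySem.List.pyGetD xs (i + 1) "" then acc + 1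
        else acc) 0
    = pvCountAdj xs := by
  rw [PySem.List.pyRange_one, List.foldl_map]
  have hn : ((PySem.List.len xs - 1) - 0).toNat = xs.length - 1 := by
    simp [PySem.List.len_eq]
  rw [hn]
  have hfun : (fun (acc : Int) (k : Nat) =>
      if PySem.List.pyGetD xs (0 + (k : Int)) "" ≠ PySem.List.pyGetD xs (0 + (k : Int) + 1) "" then acc + 1
      else acc)
      = (fun (acc : Int) (k : Nat) =>
      if xs.getD k "" ≠ xs.getD (k + 1) "" then acc + 1 else acc) := by
    funext acc k
    have h1 : (0 + (k : Int)) = ((k : Nat) : Int) := by ring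
    have h2 : ((k : Int) + 1) = ((k + 1 : Nat) : Int) := by push_cast; ring
    rw [h1, h2, PySem.List.pyGetD_natCast, PySem.List.pyGetD_natCast]
  rw [hfun, pvFoldA]
  omega

-- ===== VERDICT (by name: the statement is the Claim_ definition above) =====
theorem numFlipsIt_spec : Claim_equal_numFlipsIt := by
  intro stack _ hpre
  unfold Spec_numFlipsIt numFlipsIt numFlipsIt_alt
  simp only [pvFoldA']
  obtain ⟨h, t, rfl⟩ : ∃ h t, stack = h :: t := by
    cases stack with
    | nil => exact absurd rfl hpre
    | cons h t => exact ⟨h, t, rfl⟩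
  rw [pvNumRuns_eq]
  split_ifs <;> omega
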